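-- pv_equiv track=rewrite | github.com/Carl-Chinatomby/Algorithms-and-Data-Structures | programing_problems/search_sorted_infinite_array.py | find_pos
-- ===== SOURCE A (Python) =====
-- from typing import List
--
-- def binary_search(arr: List[int], low_idx: int, high_idx: int, num: int) -> int:
--     if high_idx >= low_idx:
--         mid_idx = low_idx + ((high_idx - low_idx)//2)
--
--         if arr[mid_idx] == num:
--             return mid_idx
--         elif arr[mid_idx] > num:
--             return binary_search(arr, low_idx, mid_idx-1, num)
--         else:
--             return binary_search(arr, mid_idx+1, high_idx, num)
--
--     return None
--
-- def find_pos(arr: List[int], num: int) -> int: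
--     low_idx = 0
--     high_idx = 1
--     val = arr[low_idx]
--
--     # find the low and the high indexes where our value must exist
--     while val < num:
--         low_idx = high_idx
--         high_idx *= 2
--         val = arr[high_idx]
--
--
--     # do a binary search in between those indexes
--     return binary_search(arr, low_idx, high_idx, num)
-- ===== SOURCE B (Python) =====
-- from typing import List
--
--
-- def find_pos(arr: List[int], num: int) -> int:
--     # galloping phase: same accesses as the original (arr[0], then arr[2], arr[4], ...)
--     low, high = 0, 1
--     if arr[0] < num:
--         while True:
--             low, high = high, 2 * high
--             if arr[high] >= num:
--                 break
--
--     # iterative binary search (flat loop instead of recursion)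
--     while low <= high:
--         mid = low + (high - low) // 2
--         v = arr[mid]
--         if v == num:
--             return mid
--         if v > num:
--             high = mid - 1
--         else:
--             low = mid + 1
--     return None
-- ===== Notes on version B (the rewrite author's own statement) =====
-- stated objective: simpler
-- what changed: The tail-recursive binary_search helper is replaced by a flat iterative while-loop inside find_pos itself, and the galloping loop is restructured as a loop-with-break without threading a val variable; same probe sequence, same results.
import Mathlib
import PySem

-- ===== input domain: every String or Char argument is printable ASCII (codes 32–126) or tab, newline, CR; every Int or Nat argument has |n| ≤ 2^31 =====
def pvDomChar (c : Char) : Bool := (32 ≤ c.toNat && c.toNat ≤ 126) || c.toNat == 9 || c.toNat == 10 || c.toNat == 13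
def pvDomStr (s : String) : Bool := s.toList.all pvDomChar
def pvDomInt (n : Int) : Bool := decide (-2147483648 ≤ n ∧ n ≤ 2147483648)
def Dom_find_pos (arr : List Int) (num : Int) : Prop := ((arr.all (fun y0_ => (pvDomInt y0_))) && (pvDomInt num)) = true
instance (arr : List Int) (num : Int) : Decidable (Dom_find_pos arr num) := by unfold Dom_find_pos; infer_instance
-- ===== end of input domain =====

-- B replaces A's recursive binary_search helper by a flat iterative loop (and a
-- break-style gallop); same probes, same results — objective: simpler.

-- ===== PORT A =====
-- recursive binary_search, literal; pyGet? none (IndexError) is excluded by Pre_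
def pvBsA (arr : List Int) (low high num : Int) : Option Int :=
  if _h : high ≥ low then
    let mid := low + PySem.Int.floordiv (high - low) 2
    match PySem.List.pyGet? arr mid with
    | none => none  -- IndexError; outside Pre_
    | some v =>
      if v == num then some mid
      else if v > num then pvBsA arr low (mid - 1) num
      else pvBsA arr (mid + 1) high num
  else none
termination_by (high + 1 - low).toNat
decreasing_by
  · have hb := PySem.Int.floordiv_two_mid_bounds (lo := 0) (hi := high - low) (by omega)
    simp only [zero_add] at hb
    omega
  · have hb := PySem.Int.floordiv_two_mid_bounds (lo := 0) (hi := high - low) (by omega)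
    simp only [zero_add] at hb
    omega

-- A's gallop: `while val < num: low = high; high *= 2; val = arr[high]`,
-- with fuel (the index doubles, so arr.length + 2 steps always suffice; a
-- fuel-out returns none exactly like the IndexError case, both outside Pre_)
def pvLoopA (arr : List Int) (num low high val : Int) (fuel : Nat) : Option Int :=
  if val < num then
    match fuel with
    | 0 => none
    | fuel' + 1 =>
      match PySem.List.pyGet? arr (high * 2) with
      | none => none  -- IndexError; outside Pre_
      | some v => pvLoopA arr num high (high * 2) v fuel'
  else pvBsA arr low high num

def find_pos (arr : List Int) (num : Int) : Option Int :=
  match PySem.List.pyGet? arr 0 with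
  | none => none  -- IndexError on empty arr; outside Pre_
  | some val => pvLoopA arr num 0 1 val (arr.length + 2)

-- ===== PORT B =====
-- B's gallop: loop-with-break that returns the final (low, high) state
def pvGallopB (arr : List Int) (num _low high : Int) (fuel : Nat) : Option (Int × Int) :=
  match fuel with
  | 0 => none
  | fuel' + 1 =>
    match PySem.List.pyGet? arr (high * 2) with
    | none => none  -- IndexError; outside Pre_
    | some v =>
      if v ≥ num then some (high, high * 2)
      else pvGallopB arr num high (high * 2) fuel'

-- B's flat `while low <= high` binary-search loop: one state update per turn
def pvBsIterB (arr : List Int) (num low high : Int) : Option Int :=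
  if _h : low ≤ high then
    let mid := low + PySem.Int.floordiv (high - low) 2
    match PySem.List.pyGet? arr mid with
    | none => none  -- IndexError; outside Pre_
    | some v =>
      if v == num then some mid
      else
        let st := if v > num then (low, mid - 1) else (mid + 1, high)
        pvBsIterB arr num st.1 st.2
  else none
termination_by (high + 1 - low).toNat
decreasing_by
  have hb := PySem.Int.floordiv_two_mid_bounds (lo := 0) (hi := high - low) (by omega)
  simp only [zero_add] at hb
  split <;> simp <;> omega

def find_pos_alt (arr : List Int) (num : Int) : Option Int :=
  match PySem.List.pyGet? arr 0 with
  | none => none  -- IndexError on empty arr; outside Pre_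
  | some v0 =>
    if v0 < num then
      match pvGallopB arr num 0 1 (arr.length + 2) with
      | none => none
      | some (low, high) => pvBsIterB arr num low high
    else pvBsIterB arr num 0 1

-- ===== PRECONDITION & SPEC =====
-- Pre_ = exactly the inputs on which Python A returns (no IndexError): arr is
-- nonempty, and if arr[0] < num the gallop finds some power-of-two index in
-- range whose value reaches num before running off the end of the list.
def Pre_find_pos (arr : List Int) (num : Int) : Prop :=
  arr ≠ [] ∧ (arr.getD 0 0 < num →
    ∃ j : Nat, j < arr.length ∧ 1 ≤ j ∧ 2 ^ j < arr.length ∧ num ≤ arr.getD (2 ^ j) 0)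
instance (arr : List Int) (num : Int) : Decidable (Pre_find_pos arr num) := by
  unfold Pre_find_pos; infer_instance

def pvWitness_find_pos : List Int × Int := ([1, 2, 3, 4, 5], 3)

def Spec_find_pos (arr : List Int) (num : Int) (out : Option Int) : Prop := out = find_pos_alt arr num
instance (arr : List Int) (num : Int) (out : Option Int) : Decidable (Spec_find_pos arr num out) := by unfold Spec_find_pos; infer_instance

-- ===== CLAIM (what is proved, stated in full; the proofs are below) =====
def Claim_equal_find_pos : Prop := ∀ (arr : List Int) (num : Int), Dom_find_pos arr num → Pre_find_pos arr num → Spec_find_pos arr num (find_pos arr num)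

-- ===== LEMMAS AND PROOFS =====

-- the recursive and the iterative binary search agree on every state
theorem pvBs_eq (arr : List Int) (low high num : Int) :
    pvBsA arr low high num = pvBsIterB arr num low high := by
  induction low, high using pvBsA.induct arr num with
  | case1 low high h mid hnone =>
    rw [pvBsA, pvBsIterB]
    have hn' : PySem.List.pyGet? arr (low + PySem.Int.floordiv (high - low) 2) = none := hnone
    simp at hn'
    simp [h, hn']
  | case2 low high h mid v hv heq =>
    rw [pvBsA, pvBsIterB]
    have hv' : PySem.List.pyGet? arr (low + PySem.Int.floordiv (high - low) 2) = some v := hv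
    simp at hv' heq
    simp [h, hv', heq]
  | case3 low high h mid v hv hne hgt ih =>
    rw [pvBsA, pvBsIterB]
    have hv' : PySem.List.pyGet? arr (low + PySem.Int.floordiv (high - low) 2) = some v := hv
    have ih' : pvBsA arr low (low + PySem.Int.floordiv (high - low) 2 - 1) num
        = pvBsIterB arr num low (low + PySem.Int.floordiv (high - low) 2 - 1) := ih
    simp at hv' hne ih'
    simp [h, hv', hne, hgt, ih']
  | case4 low high h mid v hv hne hgt ih =>
    rw [pvBsA, pvBsIterB]
    have hv' : PySem.List.pyGet? arr (low + PySem.Int.floordiv (high - low) 2) = some v := hv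
    have ih' : pvBsA arr (low + PySem.Int.floordiv (high - low) 2 + 1) high num
        = pvBsIterB arr num (low + PySem.Int.floordiv (high - low) 2 + 1) high := ih
    simp at hv' hne ih'
    simp [h, hv', hne, hgt, ih']
  | case5 low high h =>
    rw [pvBsA, pvBsIterB]
    simp only [ge_iff_le] at h
    simp [h]

-- A's threaded-val gallop loop equals B's break-style gallop followed by the search
theorem pvLoop_eq (arr : List Int) (num : Int) :
    ∀ (fuel : Nat) (low high val : Int),
      pvLoopA arr num low high val fuel =
        if val < num then
          match pvGallopB arr num low high fuel with
          | none => none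
          | some (l, h) => pvBsA arr l h num
        else pvBsA arr low high num := by
  intro fuel
  induction fuel with
  | zero =>
    intro low high val
    rw [pvLoopA]
    split <;> simp [pvGallopB]
  | succ f ih =>
    intro low high val
    rw [pvLoopA]
    split
    · rw [pvGallopB]
      cases hg : PySem.List.pyGet? arr (high * 2) with
      | none => simp
      | some v =>
        simp only [ih high (high * 2) v]
        by_cases hv : v ≥ num
        · have : ¬ v < num := by omega
          simp [hv, this]
        · have : v < num := by omega
          simp [hv, this]
    · rfl

theorem find_pos_spec_aux (arr : List Int) (num : Int) :
    find_pos arr num = find_pos_alt arr num := by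
  unfold find_pos find_pos_alt
  cases h0 : PySem.List.pyGet? arr 0 with
  | none => rfl
  | some v0 =>
    simp only [pvLoop_eq arr num (arr.length + 2) 0 1 v0]
    by_cases hv : v0 < num
    · simp only [hv, if_true]
      cases hg : pvGallopB arr num 0 1 (arr.length + 2) with
      | none => rfl
      | some p => cases p with
        | mk l h => simp [pvBs_eq]
    · simp [hv, pvBs_eq]

-- ===== VERDICT (by name: the statement is the Claim_ definition above) =====
theorem find_pos_spec : Claim_equal_find_pos := by
  intro arr num _ _
  unfold Spec_find_pos
  exact find_pos_spec_aux arr num
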